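-- pv_equiv track=rewrite | github.com/Shaina-ai770/whatsapp-sentiment-analyzer | whatsapp_emoji_fix.py | detect_hinglish
-- ===== SOURCE A (Python) =====
-- def detect_hinglish(text):
--     """
--     Detects if a text contains Hinglish (Hindi written in Roman script)
--     based on a list of common Hindi words.
--     """
--     hindi_words = ['hai', 'hain', 'nahi', 'kya', 'yrr', 'yaar', 'bhai', 'tha',
--                    'thi', 'ho', 'kr', 'kar', 'rha', 'rhi', 'bohot', 'bahut',
--                    'acha', 'accha', 'theek', 'bilkul', 'abhi', 'phir', 'matlab',
--                    'kyun', 'kaise', 'agar', 'lekin', 'aur', 'par', 'toh', 'bhi',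
--                    'mujhe', 'mere', 'teri', 'uska', 'unka', 'sab', 'kuch', 'log']
--     if not isinstance(text, str):
--         return False, 0
--     text_lower = text.lower()
--     words = text_lower.split()
--     hindi_count = sum(1 for word in words if word in hindi_words)
--     is_hinglish = hindi_count >= 1
--     return is_hinglish, hindi_count
-- ===== SOURCE B (Python) =====
-- def detect_hinglish(text):
--     """
--     Detects if a text contains Hinglish (Hindi written in Roman script)
--     based on a list of common Hindi words.
--     """
--     hindi_words = ['hai', 'hain', 'nahi', 'kya', 'yrr', 'yaar', 'bhai', 'tha',
--                    'thi', 'ho', 'kr', 'kar', 'rha', 'rhi', 'bohot', 'bahut',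
--                    'acha', 'accha', 'theek', 'bilkul', 'abhi', 'phir', 'matlab',
--                    'kyun', 'kaise', 'agar', 'lekin', 'aur', 'par', 'toh', 'bhi',
--                    'mujhe', 'mere', 'teri', 'uska', 'unka', 'sab', 'kuch', 'log']
--     if not isinstance(text, str):
--         return False, 0
--     freq = {}
--     for w in text.lower().split():
--         freq[w] = freq.get(w, 0) + 1
--     hindi_count = sum(freq.get(w, 0) for w in hindi_words)
--     return hindi_count >= 1, hindi_count
-- ===== Notes on version B (the rewrite author's own statement) =====
-- stated objective: alternative
-- what changed: B builds a frequency table of the split words in one pass and then sums the frequencies of the 39 vocabulary words, instead of testing every text word for membership in the vocabulary list.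
import Mathlib
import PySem

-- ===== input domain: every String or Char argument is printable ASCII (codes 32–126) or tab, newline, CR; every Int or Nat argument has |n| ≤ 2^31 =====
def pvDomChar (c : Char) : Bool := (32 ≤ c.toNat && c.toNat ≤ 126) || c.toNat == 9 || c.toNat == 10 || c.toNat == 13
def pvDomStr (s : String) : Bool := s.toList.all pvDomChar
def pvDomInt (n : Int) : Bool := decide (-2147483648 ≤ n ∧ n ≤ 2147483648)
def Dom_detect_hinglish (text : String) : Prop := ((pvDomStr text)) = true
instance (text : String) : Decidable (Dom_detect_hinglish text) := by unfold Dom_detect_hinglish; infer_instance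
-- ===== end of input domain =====

-- B replaces the per-word membership scan of A by a one-pass frequency table summed over the fixed vocabulary (alternative decomposition; return value proved equal).


-- the fixed Hindi vocabulary (same constant list in A and B)
def pvHindiWords : List String :=
  ["hai", "hain", "nahi", "kya", "yrr", "yaar", "bhai", "tha",
   "thi", "ho", "kr", "kar", "rha", "rhi", "bohot", "bahut",
   "acha", "accha", "theek", "bilkul", "abhi", "phir", "matlab",
   "kyun", "kaise", "agar", "lekin", "aur", "par", "toh", "bhi",
   "mujhe", "mere", "teri", "uska", "unka", "sab", "kuch", "log"]

-- ===== PORT A =====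
-- sum(1 for word in words if word in hindi_words)
def detect_hinglish (text : String) : Bool × Int :=
  let words := PySem.Str.split₀ (PySem.Str.lower text)
  let hindi_count : Int := ((words.filter (fun w => w ∈ pvHindiWords)).map (fun _ => (1 : Int))).sum
  (decide (1 ≤ hindi_count), hindi_count)

-- ===== PORT B =====
-- freq[w] = freq.get(w, 0) + 1 over the words, then sum(freq.get(w, 0) for w in hindi_words)
def detect_hinglish_alt (text : String) : Bool × Int :=
  let words := PySem.Str.split₀ (PySem.Str.lower text)
  let freq := words.foldl (fun d w => d.insert w (d.getD w 0 + 1)) PySem.Dict.empty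
  let hindi_count : Int := (pvHindiWords.map (fun w => freq.getD w 0)).sum
  (decide (1 ≤ hindi_count), hindi_count)

-- ===== PRECONDITION & SPEC =====
def Spec_detect_hinglish (text : String) (out : Bool × Int) : Prop := out = detect_hinglish_alt text
instance (text : String) (out : Bool × Int) : Decidable (Spec_detect_hinglish text out) := by unfold Spec_detect_hinglish; infer_instance

-- ===== CLAIM (what is proved, stated in full; the proofs are below) =====
def Claim_equal_detect_hinglish : Prop := ∀ (text : String), Dom_detect_hinglish text → Spec_detect_hinglish text (detect_hinglish text)

-- ===== LEMMAS AND PROOFS =====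

-- indicator sum over a list equals the (cast) count
lemma pv_ind_sum (x : String) : ∀ (V : List String),
    (V.map (fun w => if x = w then (1 : Int) else 0)).sum = (V.count x : Int)
  | [] => by simp
  | v :: V => by
    rw [List.map_cons, List.sum_cons, pv_ind_sum x V, List.count_cons]
    by_cases h : x = v
    · subst h; simp; ring
    · simp [h, Ne.symm h]

-- indicator sum over a duplicate-free vocabulary is the membership indicator
lemma pv_sum_indicator (V : List String) (hV : V.Nodup) (x : String) :
    (V.map (fun w => if x = w then (1 : Int) else 0)).sum = if x ∈ V then 1 else 0 := by
  rw [pv_ind_sum]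
  by_cases h : x ∈ V
  · simp [h, List.count_eq_one_of_mem hV h]
  · simp [h, List.count_eq_zero_of_not_mem h]

-- B's vocabulary-frequency sum counts exactly the text words that lie in the vocabulary
lemma pv_main (ws : List String) :
    (pvHindiWords.map (fun w => ((ws.count w : Int)))).sum
      = ((ws.filter (fun w => w ∈ pvHindiWords)).length : Int) := by
  induction ws with
  | nil => simp
  | cons x ws ih =>
    have hcnt : ∀ w ∈ pvHindiWords, ((x :: ws).count w : Int) = (ws.count w : Int) + (if x = w then 1 else 0) := by
      intro w _
      by_cases h : x = w <;> simp [List.count_cons, h]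
    rw [List.map_congr_left hcnt, PySem.List.sum_map_add_int, ih,
        pv_sum_indicator pvHindiWords (by decide) x, List.filter_cons]
    by_cases h : x ∈ pvHindiWords <;> simp [h]

theorem detect_hinglish_spec : Claim_equal_detect_hinglish := by
  intro text _
  unfold Spec_detect_hinglish detect_hinglish detect_hinglish_alt
  simp only [PySem.Dict.foldl_insert_getD_add_one_eq_counter, PySem.Dict.getD_counter, pv_main,
    PySem.List.sum_map_const_int]
  simp
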